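-- pv_equiv track=rewrite | github.com/4fuu/localagent | src/agent/tools.py | _find_chunk_start
-- ===== SOURCE A (Python) =====
-- def _find_chunk_start(
--     source_lines: list[str],
--     old_lines: list[str],
--     start: int,
-- ) -> int:
--     if not old_lines:
--         return start
--
--     max_idx = len(source_lines) - len(old_lines)
--     for i in range(max(start, 0), max_idx + 1):
--         if source_lines[i : i + len(old_lines)] == old_lines:
--             return i
--
--     for i in range(0, min(start, max_idx + 1)):
--         if source_lines[i : i + len(old_lines)] == old_lines:
--             return i
--
--     raise ValueError("未找到可应用的变更块上下文")
-- ===== SOURCE B (Python) =====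
-- def _find_chunk_start(
--     source_lines: list[str],
--     old_lines: list[str],
--     start: int,
-- ) -> int:
--     if not old_lines:
--         return start
--
--     m = len(old_lines)
--     occs = [i for i in range(len(source_lines) - m + 1)
--             if source_lines[i:i + m] == old_lines]
--     if not occs:
--         raise ValueError("未找到可应用的变更块上下文")
--     return next((i for i in occs if i >= start), occs[0])
-- ===== Notes on version B (the rewrite author's own statement) =====
-- stated objective: simpler
-- what changed: B replaces A's two wrap-around range loops by one scan that collects the list of all occurrence indices and then selects the first occurrence >= start, falling back to the earliest occurrence.
import Mathlib
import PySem

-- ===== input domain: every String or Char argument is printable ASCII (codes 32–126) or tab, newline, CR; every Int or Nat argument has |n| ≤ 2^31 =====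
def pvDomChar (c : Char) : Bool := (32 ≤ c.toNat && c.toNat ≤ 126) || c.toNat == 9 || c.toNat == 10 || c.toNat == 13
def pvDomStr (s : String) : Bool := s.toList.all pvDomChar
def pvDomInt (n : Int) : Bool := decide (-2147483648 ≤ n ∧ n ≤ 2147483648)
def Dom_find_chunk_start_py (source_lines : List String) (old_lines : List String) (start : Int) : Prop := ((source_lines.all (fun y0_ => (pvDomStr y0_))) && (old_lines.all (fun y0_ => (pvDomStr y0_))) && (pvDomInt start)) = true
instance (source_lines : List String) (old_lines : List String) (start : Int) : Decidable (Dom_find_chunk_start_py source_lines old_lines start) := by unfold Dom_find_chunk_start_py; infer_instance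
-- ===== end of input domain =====

-- B replaces A's two wrap-around range loops by one scan collecting all occurrence
-- indices, then selects the first occurrence ≥ start (falling back to the earliest one).

-- ===== PORT A =====
def find_chunk_start_py (source_lines : List String) (old_lines : List String) (start : Int) : Int :=
  if old_lines = [] then start
  else
    let max_idx : Int := (source_lines.length : Int) - (old_lines.length : Int)
    match (PySem.List.pyRange (max start 0) (max_idx + 1) 1).find?
        (fun i => PySem.List.slice source_lines (some i) (some (i + (old_lines.length : Int))) == old_lines) with
    | some i => i
    | none =>
      match (PySem.List.pyRange 0 (min start (max_idx + 1)) 1).find?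
          (fun i => PySem.List.slice source_lines (some i) (some (i + (old_lines.length : Int))) == old_lines) with
      | some i => i
      | none => 0  -- Python raises ValueError here; excluded by Pre_

-- ===== PORT B =====
def find_chunk_start_py_alt (source_lines : List String) (old_lines : List String) (start : Int) : Int :=
  if old_lines = [] then start
  else
    let m : Int := (old_lines.length : Int)
    let occs : List Int :=
      (PySem.List.pyRange 0 ((source_lines.length : Int) - m + 1) 1).filter
        (fun i => PySem.List.slice source_lines (some i) (some (i + m)) == old_lines)
    match occs with
    | [] => 0  -- Python raises ValueError here; excluded by Pre_
    | j :: _ => (occs.find? (fun i => decide (start ≤ i))).getD j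

-- ===== PRECONDITION & SPEC =====
-- Pre_ excludes exactly the inputs on which A raises ValueError: a nonempty old_lines
-- that occurs nowhere as a contiguous block of source_lines (B raises there too).
def Pre_find_chunk_start_py (source_lines : List String) (old_lines : List String) (start : Int) : Prop :=
  old_lines <:+: source_lines
instance (source_lines : List String) (old_lines : List String) (start : Int) : Decidable (Pre_find_chunk_start_py source_lines old_lines start) := by unfold Pre_find_chunk_start_py; infer_instance

def pvWitness_find_chunk_start_py : List String × List String × Int := (["a", "b", "a"], ["a"], 2)

def Spec_find_chunk_start_py (source_lines : List String) (old_lines : List String) (start : Int) (out : Int) : Prop := out = find_chunk_start_py_alt source_lines old_lines start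
instance (source_lines : List String) (old_lines : List String) (start : Int) (out : Int) : Decidable (Spec_find_chunk_start_py source_lines old_lines start out) := by unfold Spec_find_chunk_start_py; infer_instance

-- ===== CLAIM (what is proved, stated in full; the proofs are below) =====
def Claim_equal_find_chunk_start_py : Prop := ∀ (source_lines : List String) (old_lines : List String) (start : Int), Dom_find_chunk_start_py source_lines old_lines start → Pre_find_chunk_start_py source_lines old_lines start → Spec_find_chunk_start_py source_lines old_lines start (find_chunk_start_py source_lines old_lines start)

-- ===== LEMMAS AND PROOFS =====

-- find? is unchanged when the predicates agree on every member of the list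
theorem pv_find?_congr_mem {α : Type} (l : List α) (p q : α → Bool)
    (h : ∀ a ∈ l, p a = q a) : l.find? p = l.find? q := by
  induction l with
  | nil => rfl
  | cons x t ih =>
    simp only [List.find?_cons]
    rw [h x (List.mem_cons_self)]
    cases q x <;> simp [ih (fun a ha => h a (List.mem_cons_of_mem _ ha))]

-- the generic shape of the equivalence, with the slice test abstracted as `cond`
theorem pv_main (cond : Int → Bool) (M start : Int)
    (hex : ∃ i ∈ PySem.List.pyRange 0 M 1, cond i = true) :
    (match (PySem.List.pyRange (max start 0) M 1).find? cond with
     | some i => i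
     | none =>
       match (PySem.List.pyRange 0 (min start M) 1).find? cond with
       | some i => i
       | none => 0) =
    (match (PySem.List.pyRange 0 M 1).filter cond with
     | [] => 0
     | j :: _ =>
       (((PySem.List.pyRange 0 M 1).filter cond).find? (fun i => decide (start ≤ i))).getD j) := by
  obtain ⟨i0, hi0mem, hi0⟩ := hex
  have hi0' := (PySem.List.mem_pyRange_one).1 hi0mem
  have hMpos : 0 < M := by omega
  set a : Int := min (max start 0) M with ha
  have h0a : (0:Int) ≤ a := by omega
  have haM : a ≤ M := by omega
  -- the two A-side ranges normalise to split points of pyRange 0 M at a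
  have hr1 : PySem.List.pyRange (max start 0) M 1 = PySem.List.pyRange a M 1 := by
    by_cases h : max start 0 ≤ M
    · have : a = max start 0 := by omega
      rw [this]
    · rw [PySem.List.pyRange_one_eq_nil (by omega), PySem.List.pyRange_one_eq_nil (by omega)]
  have hr2 : PySem.List.pyRange 0 (min start M) 1 = PySem.List.pyRange 0 a 1 := by
    by_cases h : 0 ≤ start
    · have : min start M = a := by omega
      rw [this]
    · rw [PySem.List.pyRange_one_eq_nil (by omega), PySem.List.pyRange_one_eq_nil (by omega)]
  have hsplit : PySem.List.pyRange 0 M 1 = PySem.List.pyRange 0 a 1 ++ PySem.List.pyRange a M 1 :=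
    PySem.List.pyRange_one_append 0 a M h0a haM
  -- members of the tail range lie at or above start
  have htail : ∀ i ∈ PySem.List.pyRange a M 1, start ≤ i := by
    intro i hi
    have := (PySem.List.mem_pyRange_one).1 hi
    omega
  -- members of the head range lie strictly below start
  have hhead : ∀ i ∈ PySem.List.pyRange 0 a 1, ¬ (start ≤ i) := by
    intro i hi
    have := (PySem.List.mem_pyRange_one).1 hi
    omega
  -- B's find? over occs is A's first loop
  have hBfind :
      (((PySem.List.pyRange 0 M 1).filter cond).find? (fun i => decide (start ≤ i))) =
      (PySem.List.pyRange a M 1).find? cond := by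
    rw [List.find?_filter, hsplit, List.find?_append]
    have h1 : (PySem.List.pyRange 0 a 1).find?
        (fun i => decide (cond i = true ∧ decide (start ≤ i) = true)) = none := by
      rw [List.find?_eq_none]
      intro i hi
      simp [hhead i hi]
    have h2 : (PySem.List.pyRange a M 1).find?
        (fun i => decide (cond i = true ∧ decide (start ≤ i) = true)) =
        (PySem.List.pyRange a M 1).find? cond := by
      apply pv_find?_congr_mem
      intro i hi
      simp [htail i hi]
    rw [h1, h2, Option.none_or]
  rw [hr1, hr2]
  cases hAf : (PySem.List.pyRange a M 1).find? cond with
  | some i =>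
    -- occs is nonempty: i itself is in it
    have hiocc : i ∈ (PySem.List.pyRange 0 M 1).filter cond := by
      rw [List.mem_filter, hsplit]
      exact ⟨List.mem_append_right _ (List.mem_of_find?_eq_some hAf), List.find?_some hAf⟩
    cases hocc : (PySem.List.pyRange 0 M 1).filter cond with
    | nil => rw [hocc] at hiocc; cases hiocc
    | cons j t =>
      rw [hocc] at hBfind
      simp [hBfind, hAf]
  | none =>
    -- first loop fails: occs is the filtered head range, and its head is A's second loop
    have htailnil : (PySem.List.pyRange a M 1).filter cond = [] := by
      rw [List.filter_eq_nil_iff]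
      intro i hi
      have := List.find?_eq_none.1 hAf i hi
      simpa using this
    have hocc' : (PySem.List.pyRange 0 M 1).filter cond =
        (PySem.List.pyRange 0 a 1).filter cond := by
      rw [hsplit, List.filter_append, htailnil, List.append_nil]
    -- occs nonempty from the witness
    have hne : (PySem.List.pyRange 0 M 1).filter cond ≠ [] := by
      intro h
      have : i0 ∈ (PySem.List.pyRange 0 M 1).filter cond := List.mem_filter.2 ⟨hi0mem, hi0⟩
      rw [h] at this; cases this
    cases hocc : (PySem.List.pyRange 0 M 1).filter cond with
    | nil => exact absurd hocc hne
    | cons j t =>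
      have hhd : (PySem.List.pyRange 0 a 1).find? cond = some j := by
        rw [← List.head?_filter, ← hocc', hocc]
        rfl
      rw [hocc] at hBfind
      simp [hhd, hBfind, hAf]

-- ===== VERDICT (by name: the statement is the Claim_ definition above) =====
theorem find_chunk_start_py_spec : Claim_equal_find_chunk_start_py := by
  intro src old start _ hpre
  unfold Spec_find_chunk_start_py
  by_cases h0 : old = []
  · simp [find_chunk_start_py, find_chunk_start_py_alt, h0]
  · -- extract an occurrence index from the infix hypothesis
    obtain ⟨s, t, hst⟩ := hpre
    have hlen : src.length = s.length + old.length + t.length := by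
      rw [← hst]; simp; omega
    have hcond : PySem.List.slice src (some (s.length : Int))
        (some ((s.length : Int) + (old.length : Int))) == old := by
      rw [PySem.List.slice_natCast_add]
      have : src.drop s.length = old ++ t := by
        rw [← hst, List.append_assoc, List.drop_left]
      rw [this, List.take_left]
      exact beq_self_eq_true old
    have hmem : (s.length : Int) ∈ PySem.List.pyRange 0
        ((src.length : Int) - (old.length : Int) + 1) 1 := by
      rw [PySem.List.mem_pyRange_one]
      have h1 : 0 < old.length := List.length_pos_iff.2 h0
      constructor
      · positivity
      · push_cast [hlen]; omega
    have hex : ∃ i ∈ PySem.List.pyRange 0 ((src.length : Int) - (old.length : Int) + 1) 1,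
        (fun i => PySem.List.slice src (some i) (some (i + (old.length : Int))) == old) i = true :=
      ⟨(s.length : Int), hmem, hcond⟩
    simp only [find_chunk_start_py, find_chunk_start_py_alt, h0]
    exact pv_main _ _ start hex
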